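-- pv_equiv track=rewrite | github.com/jturn130/dictionary-skills-assessment | dictionary_skills.py | adv_alpha_sort_by_word_length
-- ===== SOURCE A (Python) =====
-- def adv_alpha_sort_by_word_length(words):
--     """Given a list of words, return a list of tuples, ordered by word-length.
--
--     Each tuple should have two items--a number that is a word-length,
--     and the list of words of that word length. In addition to ordering
--     the list by word length, order each sub-list of words alphabetically.
--     Now try doing it with only one call to .sort() or sorted(). What does the
--     optional "key" argument for .sort() and sorted() do?
--
--     For example:
--
--         >>> adv_alpha_sort_by_word_length(["ok", "an", "apple", "a", "day"])
--         [(1, ['a']), (2, ['an', 'ok']), (3, ['day']), (5, ['apple'])]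
--
--     """
--
--     word_length_dict = {}
--
--     for word in words:
--         #for a given list of words, find the length of each word
--         #create new dict pair: word length=key, word=value (in a list)
--         # if word length already a key, append the word to the value list
--         word_length = len(word)
--         if word_length in word_length_dict:
--             word_length_dict[word_length].append(word)
--         else:
--             word_length_dict[word_length] = [word]
--
--     #takes dict values (which are lists) and sorts them
--     for key in word_length_dict:
--             word_length_dict[key].sort()
--
--     return word_length_dict.items()
-- ===== SOURCE B (Python) =====
-- def adv_alpha_sort_by_word_length(words):
--     order = list(dict.fromkeys(len(w) for w in words))
--     return {L: sorted(w for w in words if len(w) == L) for L in order}.items()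
-- ===== Notes on version B (the rewrite author's own statement) =====
-- stated objective: alternative
-- what changed: Replaces A's dict-grouping pass (append each word to its length bucket, then a second loop sorting every bucket in place) by computing the distinct word lengths in first-appearance order via dict.fromkeys and building each entry with one filter-and-sort comprehension per length, preserving A's dict_items return.
import Mathlib
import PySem

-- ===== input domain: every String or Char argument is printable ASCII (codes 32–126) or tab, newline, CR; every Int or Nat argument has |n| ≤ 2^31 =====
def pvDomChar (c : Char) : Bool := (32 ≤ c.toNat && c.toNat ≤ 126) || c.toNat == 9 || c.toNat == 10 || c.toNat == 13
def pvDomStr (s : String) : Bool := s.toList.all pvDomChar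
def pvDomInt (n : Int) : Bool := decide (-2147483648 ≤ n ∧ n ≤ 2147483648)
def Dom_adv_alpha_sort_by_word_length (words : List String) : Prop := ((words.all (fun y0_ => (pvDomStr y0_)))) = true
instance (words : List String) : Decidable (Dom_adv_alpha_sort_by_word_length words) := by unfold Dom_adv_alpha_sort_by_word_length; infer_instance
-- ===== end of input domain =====

-- B replaces A's grouping dict (append per word, then sort each bucket in a second loop) by a
-- first-appearance list of distinct lengths followed by one filter-and-sort per length (objective: alternative).

-- ===== PORT A =====
def adv_alpha_sort_by_word_length (words : List String) : List (Int × List String) :=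
  let d1 := words.foldl (fun d word =>
      let word_length := PySem.Str.len word
      if d.contains word_length then
        d.modify word_length [] (fun v => v ++ [word])      -- word_length_dict[word_length].append(word)
      else
        d.insert word_length [word]) PySem.Dict.empty
  let d2 := d1.keys.foldl (fun d key =>
      d.modify key [] (fun v => PySem.List.sorted v (fun x => x) false)) d1   -- word_length_dict[key].sort()
  d2.items

-- ===== PORT B =====
def adv_alpha_sort_by_word_length_alt (words : List String) : List (Int × List String) :=
  let order := PySem.List.dedup (words.map (fun w => PySem.Str.len w))
  (order.foldl (fun d L =>
      d.insert L (PySem.List.sorted (words.filter (fun w => PySem.Str.len w == L)) (fun x => x) false))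
    PySem.Dict.empty).items

-- ===== PRECONDITION & SPEC =====
def Spec_adv_alpha_sort_by_word_length (words : List String) (out : List (Int × List String)) : Prop := out = adv_alpha_sort_by_word_length_alt words
instance (words : List String) (out : List (Int × List String)) : Decidable (Spec_adv_alpha_sort_by_word_length words out) := by unfold Spec_adv_alpha_sort_by_word_length; infer_instance

-- ===== CLAIM (what is proved, stated in full; the proofs are below) =====
def Claim_equal_adv_alpha_sort_by_word_length : Prop := ∀ (words : List String), Dom_adv_alpha_sort_by_word_length words → Spec_adv_alpha_sort_by_word_length words (adv_alpha_sort_by_word_length words)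

-- ===== LEMMAS AND PROOFS =====

-- A's branching group step is exactly a 'modify with default []' step.
theorem stepA_eq_modify (d : PySem.Dict Int (List String)) (w : String) :
    (if d.contains (PySem.Str.len w) then
        d.modify (PySem.Str.len w) [] (fun v => v ++ [w])
      else d.insert (PySem.Str.len w) [w])
    = d.modify (PySem.Str.len w) [] (fun v => v ++ [w]) := by
  by_cases h : d.contains (PySem.Str.len w)
  · rw [if_pos h]
  · rw [if_neg h, show d.modify (PySem.Str.len w) [] (fun v => v ++ [w])
        = d.insert (PySem.Str.len w) ((d.getD (PySem.Str.len w) []) ++ [w]) from rfl,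
      PySem.Dict.getD_of_not_contains d [] (by simpa using h)]
    rfl

-- the grouping dict, as an unconditional modify-fold
def groupDict (words : List String) : PySem.Dict Int (List String) :=
  words.foldl (fun d w => d.modify (PySem.Str.len w) [] (fun v => v ++ [w])) PySem.Dict.empty

theorem d1_eq_groupDict (words : List String) :
    words.foldl (fun d word =>
      let word_length := PySem.Str.len word
      if d.contains word_length then d.modify word_length [] (fun v => v ++ [word])
      else d.insert word_length [word]) PySem.Dict.empty = groupDict words := by
  unfold groupDict
  congr 1
  funext d w
  exact stepA_eq_modify d w

theorem keys_groupDict (words : List String) :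
    (groupDict words).keys = PySem.Set.ofList (words.map (fun w => PySem.Str.len w)) := by
  unfold groupDict
  rw [PySem.Dict.keys_foldl_modify_key words (fun w => PySem.Str.len w) [] (fun _ w v => v ++ [w])]
  simp [PySem.Set.update, PySem.Set.ofList, PySem.Dict.keys_empty]

theorem nodup_keys_groupDict (words : List String) : (groupDict words).keys.Nodup := by
  unfold groupDict
  exact PySem.Dict.nodup_keys_foldl_modify_key words (fun w => PySem.Str.len w) [] (fun _ w v => v ++ [w]) PySem.Dict.empty (by simp [PySem.Dict.keys_empty])

theorem getD_groupDict (words : List String) (c : Int) :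
    (groupDict words).getD c [] = words.filter (fun w => PySem.Str.len w == c) := by
  unfold groupDict
  have hsplit : words.foldl (fun d w => d.modify (PySem.Str.len w) [] (fun v => v ++ [w])) PySem.Dict.empty
      = (words.map (fun w => (PySem.Str.len w, w))).foldl
          (fun d p => d.modify p.1 [] (fun v => v ++ [p.2])) PySem.Dict.empty := by
    rw [List.foldl_map]
  rw [hsplit, PySem.Dict.getD_foldl_modify_append]
  simp [List.filter_map, Function.comp_def]

-- one modify pass over a Nodup key list, read back with getD
theorem getD_foldl_modify_mem (f : List String → List String) (l : List Int) (hnd : l.Nodup)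
    (d : PySem.Dict Int (List String)) (c : Int) :
    (l.foldl (fun d k => d.modify k [] f) d).getD c []
      = if c ∈ l then f (d.getD c []) else d.getD c [] := by
  induction l generalizing d with
  | nil => simp
  | cons a t ih =>
    simp only [List.foldl_cons]
    rw [ih (List.Nodup.of_cons hnd)]
    rw [PySem.Dict.getD_modify]
    by_cases hct : c ∈ t
    · have hca : c ≠ a := by
        rintro rfl; exact (List.nodup_cons.mp hnd).1 hct
      simp [hct, hca]
    · by_cases hca : c = a
      · subst hca; rw [if_neg hct]; simp
      · simp [hct, hca]

-- keys are unchanged by the sorting pass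
theorem keys_sortPass (d : PySem.Dict Int (List String)) :
    (d.keys.foldl (fun d k => d.modify k [] (fun v => PySem.List.sorted v (fun x => x) false)) d).keys = d.keys := by
  rw [PySem.Dict.keys_foldl_modify d.keys [] (fun _ k v => PySem.List.sorted v (fun x => x) false) d]
  rw [PySem.Set.update_eq_append_filter]
  have : (PySem.Set.ofList d.keys).filter (fun y => !(PySem.Set.contains d.keys y)) = [] := by
    rw [List.filter_eq_nil_iff]
    intro a ha
    have : a ∈ d.keys := (PySem.Set.mem_ofList _ _).mp ha
    simp [PySem.Set.contains, this]
  rw [this, List.append_nil]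

-- a fold of fresh inserts appends its items (specialisation of items_foldl_insert_fresh to key = id)
theorem items_insert_fold (l : List Int) (hnd : l.Nodup) (v : Int → List String)
    (d : PySem.Dict Int (List String)) (h : ∀ a ∈ l, d.contains a = false) :
    (l.foldl (fun d L => d.insert L (v L)) d).items = d.items ++ l.map (fun L => (L, v L)) := by
  exact PySem.Dict.items_foldl_insert_fresh l (fun L => L) v d h (by simpa using hnd)

-- ===== VERDICT (by name: the statement is the Claim_ definition above) =====
theorem adv_alpha_sort_by_word_length_spec : Claim_equal_adv_alpha_sort_by_word_length := by
  intro words _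
  unfold Spec_adv_alpha_sort_by_word_length
  unfold adv_alpha_sort_by_word_length adv_alpha_sort_by_word_length_alt
  simp only [d1_eq_groupDict]
  set d1 := groupDict words with hd1
  set sortf : List String → List String := fun v => PySem.List.sorted v (fun x => x) false with hsf
  set d2 := d1.keys.foldl (fun d k => d.modify k [] sortf) d1 with hd2
  have hkeys2 : d2.keys = d1.keys := keys_sortPass d1
  have hnd1 : d1.keys.Nodup := nodup_keys_groupDict words
  have hitems : d2.items = d2.keys.map (fun k => (k, d2.getD k [])) :=
    PySem.Dict.items_eq_map_keys d2 (hkeys2 ▸ hnd1) []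
  rw [hitems, hkeys2]
  -- right side
  rw [PySem.List.dedup_eq_ofList]
  rw [items_insert_fold (PySem.Set.ofList (words.map (fun w => PySem.Str.len w)))
        (PySem.Set.nodup_ofList (words.map (fun w => PySem.Str.len w))) _ _
        (by intro a _; simp [PySem.Dict.contains_empty])]
  rw [show PySem.Dict.empty.items = ([] : List (Int × List String)) from rfl, List.nil_append]
  rw [keys_groupDict]
  apply List.map_congr_left
  intro k hk
  have hkd : k ∈ d1.keys := by rw [hd1, keys_groupDict]; exact hk
  have : d2.getD k [] = sortf (d1.getD k []) := by
    rw [hd2, getD_foldl_modify_mem sortf d1.keys hnd1 d1 k]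
    simp [hkd]
  rw [this, hd1, getD_groupDict]
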